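-- pv_equiv track=rewrite | github.com/naserjawas/signpy-ml | handtrackcleannew1.py | find_last_record
-- ===== SOURCE A (Python) =====
-- def find_last_record(records, counter):
--     """
--     Find 1 previous record.
--     Note: this method is useful when in the records all the data are saved,
--     including the empty ones.
--
--     parameters:
--         records: a list of records
--         counter: number of record from the last with 0 means the last.
--
--     returns:
--         last_id, last
--     """
--     last_id = 0
--     last = []
--     for i in range(len(records)-1, -1, -1):
--         last_id = i
--         last = records[last_id]
--         if len(last) > 0:
--             if counter > 0:
--                 counter -= 1
--                 last_id = 0
--                 last = []
--             else:
--                 break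
--
--     return last_id, last
-- ===== SOURCE B (Python) =====
-- def find_last_record(records, counter):
--     idx = [i for i in range(len(records) - 1, -1, -1) if len(records[i]) > 0]
--     pos = counter if counter > 0 else 0
--     if pos < len(idx):
--         return idx[pos], records[idx[pos]]
--     return 0, []
-- ===== Notes on version B (the rewrite author's own statement) =====
-- stated objective: simpler
-- what changed: Replaces the stateful reverse loop with break/counter-decrement by building the list of non-empty indices (newest first) once and doing a direct position lookup, with a single (0, []) fallback.
import Mathlib
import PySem

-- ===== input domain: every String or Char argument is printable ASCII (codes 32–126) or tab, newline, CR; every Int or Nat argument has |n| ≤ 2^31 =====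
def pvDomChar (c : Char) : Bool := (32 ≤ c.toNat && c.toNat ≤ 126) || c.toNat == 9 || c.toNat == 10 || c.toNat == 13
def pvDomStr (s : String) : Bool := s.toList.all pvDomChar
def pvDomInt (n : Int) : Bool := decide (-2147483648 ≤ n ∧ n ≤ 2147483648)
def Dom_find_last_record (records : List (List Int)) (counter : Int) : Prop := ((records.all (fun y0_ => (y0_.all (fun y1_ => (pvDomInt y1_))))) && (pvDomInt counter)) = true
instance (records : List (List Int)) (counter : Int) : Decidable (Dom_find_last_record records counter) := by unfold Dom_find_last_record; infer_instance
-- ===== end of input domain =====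

-- B replaces A's stateful reverse loop (break / counter decrement) by building the list of
-- non-empty indices once and doing a direct position lookup; objective: simpler.

-- ===== PORT A =====
-- the loop 'for i in range(len(records)-1,-1,-1)' with break, carrying (counter, last_id, last);
-- records[i] is always in range here, so '(pyGet? …).getD []' is exact
def findLoopA (records : List (List Int)) : Int → Int → List Int → List Int → Int × List Int
  | _, last_id, last, [] => (last_id, last)
  | counter, _, _, i :: rest =>
    let last := (PySem.List.pyGet? records i).getD []
    if last.length > 0 then
      if counter > 0 then findLoopA records (counter - 1) 0 [] rest
      else (i, last)
    else findLoopA records counter i last rest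

def find_last_record (records : List (List Int)) (counter : Int) : Int × List Int :=
  findLoopA records counter 0 [] (PySem.List.pyRange ((records.length : Int) - 1) (-1) (-1))

-- ===== PORT B =====
def find_last_record_alt (records : List (List Int)) (counter : Int) : Int × List Int :=
  let idx := (PySem.List.pyRange ((records.length : Int) - 1) (-1) (-1)).filter
      (fun i => ((PySem.List.pyGet? records i).getD []).length > 0)
  let pos := if counter > 0 then counter else 0
  if pos < (idx.length : Int) then
    let j := (PySem.List.pyGet? idx pos).getD 0
    (j, (PySem.List.pyGet? records j).getD [])
  else (0, [])

-- ===== PRECONDITION & SPEC =====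
def Spec_find_last_record (records : List (List Int)) (counter : Int) (out : Int × List Int) : Prop := out = find_last_record_alt records counter
instance (records : List (List Int)) (counter : Int) (out : Int × List Int) : Decidable (Spec_find_last_record records counter out) := by unfold Spec_find_last_record; infer_instance

-- ===== CLAIM (what is proved, stated in full; the proofs are below) =====
def Claim_equal_find_last_record : Prop := ∀ (records : List (List Int)) (counter : Int), Dom_find_last_record records counter → Spec_find_last_record records counter (find_last_record records counter)

-- ===== LEMMAS AND PROOFS =====

-- the value A's loop ends with when it exhausts the index list without breaking
def fbAux (records : List (List Int)) (lid : Int) (lst : List Int) (l : List Int) : Int × List Int :=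
  match l.getLast? with
  | none => (lid, lst)
  | some j =>
    if ((PySem.List.pyGet? records j).getD []).length > 0 then (0, [])
    else (j, (PySem.List.pyGet? records j).getD [])

lemma fbAux_cons_cons (records : List (List Int)) (lid lid' : Int) (lst lst' : List Int)
    (i j : Int) (rest : List Int) :
    fbAux records lid lst (i :: j :: rest) = fbAux records lid' lst' (j :: rest) := by
  cases h : (j :: rest).getLast? with
  | none => simp [List.getLast?_eq_none_iff] at h
  | some k => simp [fbAux, h]

lemma loopA_eq (records : List (List Int)) (l : List Int) : ∀ (c lid : Int) (lst : List Int),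
    findLoopA records c lid lst l =
      (let idx := l.filter (fun i => ((PySem.List.pyGet? records i).getD []).length > 0)
       let pos := if c > 0 then c else 0
       if pos < (idx.length : Int) then
         ((PySem.List.pyGet? idx pos).getD 0,
          (PySem.List.pyGet? records ((PySem.List.pyGet? idx pos).getD 0)).getD [])
       else fbAux records lid lst l) := by
  induction l with
  | nil =>
    intro c lid lst
    simp [findLoopA, fbAux]
    omega
  | cons i rest ih =>
    intro c lid lst
    by_cases hp : ((PySem.List.pyGet? records i).getD []).length > 0
    · by_cases hc : c > 0
      · have h1 : findLoopA records c lid lst (i :: rest) =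
            findLoopA records (c - 1) 0 [] rest := by
          simp [findLoopA, hp, hc]
        rw [h1, ih]
        obtain ⟨n, rfl⟩ : ∃ n : ℕ, c = (n : ℤ) + 1 := ⟨(c - 1).toNat, by omega⟩
        simp only [List.filter_cons, hp, decide_true, if_true, add_sub_cancel_right,
          if_pos hc, List.length_cons]
        have hn : (if (n : ℤ) > 0 then (n : ℤ) else 0) = (n : ℤ) := by omega
        push_cast
        rw [hn, PySem.List.pyGet?_cons_succ]
        have hlen : ((n : ℤ) < ((List.filter (fun i => decide (((PySem.List.pyGet? records i).getD []).length > 0)) rest).length : ℤ)) ↔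
            ((n : ℤ) + 1 < (((List.filter (fun i => decide (((PySem.List.pyGet? records i).getD []).length > 0)) rest).length : ℤ) + 1)) := by omega
        rw [if_congr hlen rfl rfl]
        cases rest with
        | nil => simp [fbAux, hp]
        | cons j r => rw [fbAux_cons_cons records lid 0 lst []]
      · simp [findLoopA, hp, hc]
    · have h1 : findLoopA records c lid lst (i :: rest) =
          findLoopA records c i ((PySem.List.pyGet? records i).getD []) rest := by
        simp [findLoopA, hp]
      rw [h1, ih]
      simp only [List.filter_cons, hp, decide_false, Bool.false_eq_true, if_false]
      cases rest with
      | nil => simp [fbAux, hp]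
      | cons j r => rw [fbAux_cons_cons records lid i lst ((PySem.List.pyGet? records i).getD [])]

-- ===== VERDICT (by name: the statement is the Claim_ definition above) =====
theorem find_last_record_spec : Claim_equal_find_last_record := by
  intro records counter _
  unfold Spec_find_last_record find_last_record find_last_record_alt
  rw [loopA_eq]
  have hfb : fbAux records 0 [] (PySem.List.pyRange ((records.length : Int) - 1) (-1) (-1)) = (0, []) := by
    cases records with
    | nil =>
      rw [PySem.List.pyRange_neg_one_eq_nil (by simp)]
      rfl
    | cons r rs =>
      have hlast : (PySem.List.pyRange (((r :: rs).length : Int) - 1) (-1) (-1)).getLast? = some 0 := by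
        rw [PySem.List.pyRange_neg_one_eq_reverse, List.getLast?_reverse,
          PySem.List.pyRange_one_cons (by simp)]
        rfl
      unfold fbAux
      rw [hlast]
      by_cases hp : ((PySem.List.pyGet? (r :: rs) 0).getD []).length > 0
      · simp
      · simp only [PySem.List.pyGet?_zero_cons, Option.getD_some] at hp
        have hr : r = [] := List.eq_nil_of_length_eq_zero (by omega)
        simp [hr]
  simp only [hfb]
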